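-- pv_equiv track=rewrite | github.com/hiramatsutaiga/inquiry-app-prototype | inquiry_app_prototype.py | _build_words_from_labels
-- ===== SOURCE A (Python) =====
-- def _build_words_from_labels(labels, limit=10):
--     seen = set(); words = []
--     for lab in labels or []:
--         w = str(lab).replace("_"," ").split(",")[0].strip().lower()
--         if 2 <= len(w) <= 30 and w not in seen:
--             seen.add(w); words.append(w)
--         if len(words) >= limit: break
--     if len(words) < 3:
--         for w in ["animal","object","place","person","food","plant","color","shape","material","action"]:
--             if w not in seen:
--                 words.append(w); seen.add(w)
--             if len(words) >= limit: break
--     return words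
-- ===== SOURCE B (Python) =====
-- _FALLBACK = ["animal","object","place","person","food","plant","color","shape","material","action"]
--
-- def _build_words_from_labels(labels, limit=10):
--     # Map every valid cleaned word to the index of its first occurrence,
--     # then recover the order by sorting on that index and capping with a slice.
--     first = {}
--     for i, lab in enumerate(labels or []):
--         w = str(lab).replace("_", " ").split(",")[0].strip().lower()
--         if 2 <= len(w) <= 30:
--             first.setdefault(w, i)
--     words = sorted(first, key=first.get)[:limit]
--     if len(words) < 3:
--         missing = [w for w in _FALLBACK if w not in words]
--         words += missing[:limit - len(words)]
--     return words
-- ===== Notes on version B (the rewrite author's own statement) =====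
-- stated objective: alternative
-- what changed: A's fused loop (seen-set, in-loop dedup, early break, then a second break-driven fallback loop) is replaced by: build a dict mapping each valid cleaned word to its first-occurrence index, recover the order by sorting the keys on that index, cap with a slice, and fill the shortfall with one comprehension over the fallback list sliced to limit - len(words) - no breaks and no seen set.
-- outside the precondition, e.g. on _build_words_from_labels(['cat'], 1): A returns ['cat', 'animal'], B returns ['cat']; on _build_words_from_labels(None, 0): A returns ['animal'], B returns []; on _build_words_from_labels(['cat', 'dog'], 2): A returns ['cat', 'dog', 'animal'], B returns ['cat', 'dog']
import Mathlib
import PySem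

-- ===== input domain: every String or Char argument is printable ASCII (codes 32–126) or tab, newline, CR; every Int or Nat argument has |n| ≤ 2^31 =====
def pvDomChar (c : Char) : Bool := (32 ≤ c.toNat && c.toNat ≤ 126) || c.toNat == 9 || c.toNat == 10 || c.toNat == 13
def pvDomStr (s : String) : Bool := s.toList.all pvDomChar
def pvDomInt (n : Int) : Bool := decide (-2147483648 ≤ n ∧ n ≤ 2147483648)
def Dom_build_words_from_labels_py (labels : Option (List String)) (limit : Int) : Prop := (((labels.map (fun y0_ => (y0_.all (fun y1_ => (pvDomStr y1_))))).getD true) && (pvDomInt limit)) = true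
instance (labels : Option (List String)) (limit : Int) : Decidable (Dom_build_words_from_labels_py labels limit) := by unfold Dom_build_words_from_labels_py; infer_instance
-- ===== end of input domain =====

-- B replaces A's fused break-driven loops by a first-occurrence-index dict, a sort on that
-- index with a cap slice, and a sliced comprehension for the fallback fill (objective: alternative).

-- w = str(lab).replace("_"," ").split(",")[0].strip().lower()  (the cleaning expression both Pythons share)
def pvClean (lab : String) : String :=
  PySem.Str.lower (PySem.Str.strip (((PySem.Str.split? (PySem.Str.replace lab "_" " ") ",").getD []).headD ""))

-- 2 <= len(w) <= 30  (the validity test both Pythons share)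
def pvValid (w : String) : Bool := 2 ≤ PySem.Str.len w && PySem.Str.len w ≤ 30

def pvFallback : List String :=
  ["animal","object","place","person","food","plant","color","shape","material","action"]

-- ===== PORT A =====
-- A's main loop: state (seen, words), break when len(words) >= limit
def pvALoop (limit : Int) : List String → PySem.Set String → List String → PySem.Set String × List String
  | [], seen, words => (seen, words)
  | lab :: rest, seen, words =>
    let w := pvClean lab
    let c := pvValid w && !(PySem.Set.contains seen w)
    let seen' := if c then PySem.Set.add seen w else seen
    let words' := if c then words ++ [w] else words
    if limit ≤ (words'.length : Int) then (seen', words') else pvALoop limit rest seen' words'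

-- A's fallback loop over the fixed word list
def pvAFb (limit : Int) : List String → PySem.Set String → List String → List String
  | [], _, words => words
  | w :: rest, seen, words =>
    let seen' := if PySem.Set.contains seen w then seen else PySem.Set.add seen w
    let words' := if PySem.Set.contains seen w then words else words ++ [w]
    if limit ≤ (words'.length : Int) then words' else pvAFb limit rest seen' words'

def build_words_from_labels_py (labels : Option (List String)) (limit : Int) : List String :=
  let st := pvALoop limit (labels.getD []) PySem.Set.empty []
  if (st.2.length : Int) < 3 then pvAFb limit pvFallback st.1 st.2 else st.2

-- ===== PORT B =====
-- first.setdefault(w, i) inside the loop over enumerate(labels or [])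
def pvBStep (d : PySem.Dict String Int) (p : Int × String) : PySem.Dict String Int :=
  let w := pvClean p.2
  if pvValid w then PySem.Dict.setdefault d w p.1 else d

def build_words_from_labels_py_alt (labels : Option (List String)) (limit : Int) : List String :=
  let first := (PySem.List.enumerate (labels.getD []) 0).foldl pvBStep PySem.Dict.empty
  -- words = sorted(first, key=first.get)[:limit]
  let words := PySem.List.slice
    (PySem.List.sorted (PySem.Dict.keys first) (fun w => PySem.Dict.getD first w 0) false)
    none (some limit)
  if (words.length : Int) < 3 then
    -- words += [w for w in _FALLBACK if w not in words][:limit - len(words)]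
    words ++ PySem.List.slice (pvFallback.filter (fun w => !(words.contains w)))
      none (some (limit - (words.length : Int)))
  else words

-- ===== PRECONDITION & SPEC =====
-- Pre_ excludes limit < 3: there the ≤limit cap and the ≥3 fallback fill contradict each other
-- and A's resolution (a break checked only after a possible append, so it can return more than
-- limit words) and B's (respect the cap) are both defensible on this unspecified degenerate
-- corner (the caller uses the default limit=10).
def Pre_build_words_from_labels_py (labels : Option (List String)) (limit : Int) : Prop := 3 ≤ limit
instance (labels : Option (List String)) (limit : Int) : Decidable (Pre_build_words_from_labels_py labels limit) := by unfold Pre_build_words_from_labels_py; infer_instance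

def pvWitness_build_words_from_labels_py : Option (List String) × Int := (some ["Cat_x, y", "dog"], 10)

def Spec_build_words_from_labels_py (labels : Option (List String)) (limit : Int) (out : List String) : Prop := out = build_words_from_labels_py_alt labels limit
instance (labels : Option (List String)) (limit : Int) (out : List String) : Decidable (Spec_build_words_from_labels_py labels limit out) := by unfold Spec_build_words_from_labels_py; infer_instance

-- ===== CLAIM (what is proved, stated in full; the proofs are below) =====
def Claim_equal_build_words_from_labels_py : Prop := ∀ (labels : Option (List String)) (limit : Int), Dom_build_words_from_labels_py labels limit → Pre_build_words_from_labels_py labels limit → Spec_build_words_from_labels_py labels limit (build_words_from_labels_py labels limit)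

-- ===== LEMMAS AND PROOFS =====

theorem pv_mem_of_contains_true {s : PySem.Set String} {x : String}
    (h : PySem.Set.contains s x = true) : x ∈ s := by simpa using h

theorem pv_not_mem_of_contains_false {s : PySem.Set String} {x : String}
    (h : PySem.Set.contains s x = false) : x ∉ s := by simpa using h

-- fused valid-filter + dedup fold (proof-only reference function)
def pvF (acc : List String) : List String → List String
  | [] => acc
  | w :: ws => pvF (if pvValid w && !(PySem.Set.contains acc w) then acc ++ [w] else acc) ws

theorem pvF_prefix (ws : List String) : ∀ acc, acc <+: pvF acc ws := by
  induction ws with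
  | nil => intro acc; exact List.prefix_refl _
  | cons w ws ih =>
    intro acc
    simp only [pvF]
    split
    · exact List.IsPrefix.trans (by simp) (ih _)
    · exact ih _

-- ordered dedup of the valid words equals the fused fold
theorem pvDedup_filter_eq (ws : List String) : ∀ acc : List String,
    ((ws.filter pvValid).foldl PySem.Set.add acc) = pvF acc ws := by
  induction ws with
  | nil => intro acc; simp [pvF]
  | cons w ws ih =>
    intro acc
    rw [List.filter_cons]
    cases hv : pvValid w with
    | false => simp only [pvF, hv, Bool.false_and, Bool.false_eq_true, ite_false]; exact ih acc
    | true =>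
      cases hc : PySem.Set.contains acc w with
      | true =>
        have : PySem.Set.add acc w = acc :=
          PySem.Set.add_of_mem (pv_mem_of_contains_true hc)
        simp only [pvF, hv, hc, Bool.true_and, Bool.not_true,
          Bool.false_eq_true, ite_false, List.foldl_cons, this, ite_true]
        exact ih acc
      | false =>
        have : PySem.Set.add acc w = acc ++ [w] :=
          PySem.Set.add_of_not_mem (pv_not_mem_of_contains_false hc)
        simp only [pvF, hv, hc, Bool.true_and, Bool.not_false, List.foldl_cons, this, ite_true]
        exact ih (acc ++ [w])

-- A's main loop, run with seen = words (as lists), computes take(limit) of the fused fold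
theorem pvALoop_eq (limit : Int) (labs : List String) : ∀ (acc : List String),
    (acc.length : Int) < limit →
    pvALoop limit labs acc acc
      = ((pvF acc (labs.map pvClean)).take limit.toNat,
         (pvF acc (labs.map pvClean)).take limit.toNat) := by
  induction labs with
  | nil =>
    intro acc h
    have : acc.length ≤ limit.toNat := by omega
    simp [pvALoop, pvF, List.take_of_length_le this]
  | cons lab rest ih =>
    intro acc h
    simp only [pvALoop, List.map_cons, pvF]
    cases hcond : (pvValid (pvClean lab) && !(PySem.Set.contains acc (pvClean lab))) with
    | false =>
      have hbr : ¬ limit ≤ (acc.length : Int) := by omega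
      simp only [Bool.false_eq_true, ite_false, hbr]
      exact ih acc h
    | true =>
      have hadd : PySem.Set.add acc (pvClean lab) = acc ++ [pvClean lab] := by
        have hcf : PySem.Set.contains acc (pvClean lab) = false := by
          cases hcc : PySem.Set.contains acc (pvClean lab)
          · rfl
          · have := hcond; rw [hcc] at this; simp at this
        exact PySem.Set.add_of_not_mem (pv_not_mem_of_contains_false hcf)
      simp only [ite_true, hadd]
      by_cases hbr : limit ≤ ((acc ++ [pvClean lab]).length : Int)
      · have hlen : (acc ++ [pvClean lab]).length = limit.toNat := by
          simp at hbr ⊢; omega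
        have hp := List.prefix_iff_eq_take.mp (pvF_prefix (rest.map pvClean) (acc ++ [pvClean lab]))
        simp only [hbr, ite_true]
        rw [← hlen]
        exact Prod.ext (by simpa using hp) (by simpa using hp)
      · simp only [hbr, ite_false]
        exact ih (acc ++ [pvClean lab]) (by simp at hbr ⊢; omega)

-- B's dict-building fold: keys in first-occurrence order, values strictly increasing
theorem pvBDict (labs : List String) : ∀ (s : Int) (d : PySem.Dict String Int),
    d.keys.Nodup → (d.items.map Prod.snd).Pairwise (· < ·) → (∀ p ∈ d.items, p.2 < s) →
    ((PySem.List.enumerate labs s).foldl pvBStep d).keys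
        = ((labs.map pvClean).filter pvValid).foldl PySem.Set.add d.keys
    ∧ ((PySem.List.enumerate labs s).foldl pvBStep d).keys.Nodup
    ∧ (((PySem.List.enumerate labs s).foldl pvBStep d).items.map Prod.snd).Pairwise (· < ·) := by
  induction labs with
  | nil =>
    intro s d h1 h2 _
    exact ⟨by simp [PySem.List.enumerate_nil], by simpa [PySem.List.enumerate_nil] using h1,
      by simpa [PySem.List.enumerate_nil] using h2⟩
  | cons lab rest ih =>
    intro s d h1 h2 h3
    rw [PySem.List.enumerate_cons, List.foldl_cons, List.map_cons, List.filter_cons]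
    show ((PySem.List.enumerate rest (s+1)).foldl pvBStep (pvBStep d (s, lab))).keys = _ ∧ _
    unfold pvBStep
    simp only []
    cases hv : pvValid (pvClean lab) with
    | false =>
      simp only [Bool.false_eq_true, ite_false]
      exact ih (s+1) d h1 h2 (fun p hp => by have := h3 p hp; omega)
    | true =>
      simp only [ite_true]
      cases hc : d.contains (pvClean lab) with
      | true =>
        rw [PySem.Dict.setdefault_of_contains d s hc]
        have hmem : pvClean lab ∈ d.keys := (PySem.Dict.contains_iff_mem_keys d _).mp hc
        have := ih (s+1) d h1 h2 (fun p hp => by have := h3 p hp; omega)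
        rw [List.foldl_cons, PySem.Set.add_of_mem hmem]
        exact this
      | false =>
        rw [PySem.Dict.setdefault_of_not_contains d s hc]
        have hmem : pvClean lab ∉ d.keys := by
          intro hm; rw [← PySem.Dict.contains_iff_mem_keys] at hm; rw [hc] at hm; cases hm
        have hkeys := PySem.Dict.keys_insert_of_not_contains d s hc
        have hitems := PySem.Dict.items_insert_of_not_contains d s hc
        have h1' : (d.insert (pvClean lab) s).keys.Nodup := by
          rw [hkeys]; exact List.Nodup.append h1 (List.nodup_singleton _)
            (by simpa [List.disjoint_singleton] using hmem)
        have h2' : ((d.insert (pvClean lab) s).items.map Prod.snd).Pairwise (· < ·) := by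
          rw [hitems, List.map_append, List.pairwise_append]
          refine ⟨h2, by simp, ?_⟩
          intro a ha b hb
          simp only [List.mem_map] at ha hb
          obtain ⟨p, hp, rfl⟩ := ha
          simp at hb
          subst hb
          exact h3 p hp
        have h3' : ∀ p ∈ (d.insert (pvClean lab) s).items, p.2 < s + 1 := by
          rw [hitems]
          intro p hp
          rcases List.mem_append.mp hp with h | h
          · have := h3 p h; omega
          · simp at h; subst h; omega
        have := ih (s+1) (d.insert (pvClean lab) s) h1' h2' h3'
        rw [List.foldl_cons, PySem.Set.add_of_not_mem hmem, ← hkeys]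
        exact this

-- keys of a value-increasing dict are strictly increasing under getD-lookup
theorem pvKeysPairwise (d : PySem.Dict String Int)
    (hnd : d.keys.Nodup) (hpw : (d.items.map Prod.snd).Pairwise (· < ·)) :
    d.keys.Pairwise (fun a b => PySem.Dict.getD d a 0 < PySem.Dict.getD d b 0) := by
  have hkeys : d.keys = d.items.map Prod.fst := rfl
  rw [hkeys]
  rw [List.pairwise_map] at hpw ⊢
  refine hpw.imp_of_mem ?_
  intro p q hp hq hlt
  rw [PySem.Dict.getD_of_mem_items d (by simpa using hp) hnd 0,
      PySem.Dict.getD_of_mem_items d (by simpa using hq) hnd 0]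
  exact hlt

-- A's fallback loop with seen = words, in closed form
theorem pvAFb_closed (limit : Int) : ∀ (fb words : List String), fb.Nodup →
    (words.length : Int) < limit →
    pvAFb limit fb words words
      = words ++ (fb.filter (fun w => !(words.contains w))).take (limit - (words.length : Int)).toNat := by
  intro fb
  induction fb with
  | nil => intro words _ _; simp [pvAFb]
  | cons w rest ih =>
    intro words hnd hlt
    have hw : w ∉ rest := (List.nodup_cons.mp hnd).1
    have hndr : rest.Nodup := (List.nodup_cons.mp hnd).2
    simp only [pvAFb, List.filter_cons]
    cases hc : PySem.Set.contains words w with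
    | true =>
      have hc' : words.contains w = true := hc
      have hbr : ¬ limit ≤ (words.length : Int) := by omega
      simp only [hc', ite_true, hbr, ite_false, Bool.not_true]
      rw [ih words hndr hlt]
      simp
    | false =>
      have hc' : words.contains w = false := hc
      have hadd : PySem.Set.add words w = words ++ [w] := by
        simp [List.contains_eq_mem] at hc'
        exact PySem.Set.add_of_not_mem (by simpa [List.contains_eq_mem] using hc')
      simp only [hc', Bool.false_eq_true, ite_false, hadd, Bool.not_false, ite_true]
      have hfilt : rest.filter (fun x => !((words ++ [w]).contains x))
          = rest.filter (fun x => !(words.contains x)) := by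
        apply List.filter_congr
        intro x hx
        have hxw : x ≠ w := fun h => hw (h ▸ hx)
        simp [List.contains_eq_mem, hxw]
      by_cases hbr : limit ≤ ((words ++ [w]).length : Int)
      · have h1 : (limit - (words.length : Int)).toNat = 1 := by simp at hbr ⊢; omega
        simp only [hbr, ite_true, h1]
        simp
      · simp only [hbr, ite_false]
        rw [ih (words ++ [w]) hndr (by simp at hbr ⊢; omega), hfilt]
        have h2 : (limit - (words.length : Int)).toNat
            = (limit - ((words ++ [w]).length : Int)).toNat + 1 := by simp at hbr ⊢; omega
        rw [h2]
        simp [List.take_succ_cons]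

-- ===== VERDICT (by name: the statement is the Claim_ definition above) =====
theorem build_words_from_labels_py_spec : Claim_equal_build_words_from_labels_py := by
  intro labels limit _ hpre
  have hpre' : (3 : Int) ≤ limit := hpre
  unfold Spec_build_words_from_labels_py
  unfold build_words_from_labels_py build_words_from_labels_py_alt
  have hempty : (PySem.Set.empty : PySem.Set String) = ([] : List String) := rfl
  have hA := pvALoop_eq limit (labels.getD []) [] (by simp; omega)
  obtain ⟨hkeys, hnd, hpw⟩ := pvBDict (labels.getD []) 0 PySem.Dict.empty
    (by simp [List.Nodup]) (by constructor) (by intro p hp; cases hp)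
  have hkeysF : ((PySem.List.enumerate (labels.getD []) 0).foldl pvBStep PySem.Dict.empty).keys
      = pvF [] ((labels.getD []).map pvClean) := by
    rw [hkeys]
    exact pvDedup_filter_eq ((labels.getD []).map pvClean) []
  have hsort := PySem.List.sorted_eq_of_perm_of_pairwise_lt _ _
    (fun w => PySem.Dict.getD ((PySem.List.enumerate (labels.getD []) 0).foldl pvBStep PySem.Dict.empty) w 0)
    (List.Perm.refl _) (pvKeysPairwise _ hnd hpw)
  have hslice : PySem.List.slice
      (PySem.List.sorted ((PySem.List.enumerate (labels.getD []) 0).foldl pvBStep PySem.Dict.empty).keys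
        (fun w => PySem.Dict.getD ((PySem.List.enumerate (labels.getD []) 0).foldl pvBStep PySem.Dict.empty) w 0) false)
      none (some limit)
      = (pvF [] ((labels.getD []).map pvClean)).take limit.toNat := by
    rw [hsort, hkeysF, PySem.List.slice_to _ (by omega)]
  simp only [hempty, hA, hslice]
  split
  · next h =>
    rw [PySem.List.slice_to _ (by simp at h ⊢; omega)]
    rw [pvAFb_closed limit pvFallback _ (by decide) (by simp at h ⊢; omega)]
  · rfl
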